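-- pv_equiv track=rewrite | github.com/arturforth/ejercicios | matriz/matriz.py | horsec
-- ===== SOURCE A (Python) =====
-- def horsec(mat):
--     n = len(mat)
--
--     sec = []    # Secuencia en una fila cualquiera
--     coord_secs = []   # Coordenadas de las secuencias encontradas en todas las filas
--
--     lensec1 = 3     # Secuencia simple
--     lensec2 = 4     # Secuencias superpuestas
--
--     for i in range(n-1):    # Busca una secuencia en todas las filas
--         for j in range(n-1):    # Busca una secuencia en la fila j
--             if mat[i][j] == mat[i][j+1]:
--                 sec.append(j)
--
--         if sec and sec == list(range(min(sec), max(sec)+1)):    # Si sec contiene elementos y si son consecutivos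
--             if len(sec) == lensec1:
--                 coord_secs.append([i, sec[0]])
--                 coord_secs.append([i, sec[2]+1])
--             if len(sec) == lensec2:
--                 coord_secs.append([i, sec[0]])
--                 coord_secs.append([i, sec[2]+1])
--                 coord_secs.append([i, sec[0]+1])
--                 coord_secs.append([i, sec[3]+1])
--
--         sec.clear()
--
--     return coord_secs
-- ===== SOURCE B (Python) =====
-- def horsec(mat):
--     n = len(mat)
--     out = []
--     for i in range(n - 1):
--         row = mat[i][:n]
--         # maximal runs of equal consecutive values, as (start, length), one pass
--         runs = []
--         if row:
--             start = 0
--             for k in range(1, len(row)):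
--                 if row[k] != row[k - 1]:
--                     runs.append((start, k - start))
--                     start = k
--             runs.append((start, len(row) - start))
--         long = [(s, L) for (s, L) in runs if L >= 2]
--         if len(long) == 1:
--             s, L = long[0]
--             if L == 4:
--                 out += [[i, s], [i, s + 3]]
--             elif L == 5:
--                 out += [[i, s], [i, s + 3], [i, s + 1], [i, s + 4]]
--     return out
-- ===== Notes on version B (the rewrite author's own statement) =====
-- stated objective: idiomatic
-- what changed: B scans each row once for maximal runs of equal consecutive values instead of building A's list of matching pair-indices and testing it against list(range(min,max+1)); a single run of length 4 or 5 directly yields the coordinates.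
import Mathlib
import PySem

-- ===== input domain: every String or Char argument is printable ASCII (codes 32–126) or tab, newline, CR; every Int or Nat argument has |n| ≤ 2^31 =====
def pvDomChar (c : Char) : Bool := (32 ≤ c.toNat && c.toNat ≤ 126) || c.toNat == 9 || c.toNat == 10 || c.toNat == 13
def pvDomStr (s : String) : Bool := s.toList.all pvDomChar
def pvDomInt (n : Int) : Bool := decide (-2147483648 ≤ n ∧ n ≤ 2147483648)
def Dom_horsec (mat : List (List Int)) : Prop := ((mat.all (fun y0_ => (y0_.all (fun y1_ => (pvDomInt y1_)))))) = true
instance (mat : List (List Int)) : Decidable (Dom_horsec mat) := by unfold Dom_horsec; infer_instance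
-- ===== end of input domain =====

-- B replaces A's pair-index list + range(min,max+1) consecutiveness test by a single
-- scan for the maximal runs of equal consecutive values in each row (idiomatic; same cost).


-- ===== PORT A =====
-- literal transliteration of Source A; Pre_horsec keeps every pyGet? in range, so the
-- .getD defaults are never the value used.
def horsec (mat : List (List Int)) : List (List Int) :=
  let n : Int := (mat.length : Int)
  let lensec1 : Int := 3
  let lensec2 : Int := 4
  (PySem.List.pyRange 0 (n - 1)).foldl (fun coord_secs i =>
    let sec : List Int :=
      (PySem.List.pyRange 0 (n - 1)).foldl (fun sec j =>
        if (PySem.List.pyGet? ((PySem.List.pyGet? mat i).getD []) j).getD 0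
           = (PySem.List.pyGet? ((PySem.List.pyGet? mat i).getD []) (j + 1)).getD 0
        then sec ++ [j] else sec) []
    if sec ≠ [] ∧
       sec = PySem.List.pyRange ((PySem.List.min? sec (fun y => y)).getD 0)
                                (((PySem.List.max? sec (fun y => y)).getD 0) + 1) then
      let cs1 :=
        if (sec.length : Int) = lensec1 then
          coord_secs ++ [[i, (PySem.List.pyGet? sec 0).getD 0]]
                     ++ [[i, (PySem.List.pyGet? sec 2).getD 0 + 1]]
        else coord_secs
      if (sec.length : Int) = lensec2 then
        cs1 ++ [[i, (PySem.List.pyGet? sec 0).getD 0]]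
            ++ [[i, (PySem.List.pyGet? sec 2).getD 0 + 1]]
            ++ [[i, (PySem.List.pyGet? sec 0).getD 0 + 1]]
            ++ [[i, (PySem.List.pyGet? sec 3).getD 0 + 1]]
      else cs1
    else coord_secs) []

-- ===== PORT B =====
-- Source B's run scan: prev = row[k-1], s = start, c = k - start (current run length)
def pvRunsGo : Int → Nat → Nat → List Int → List (Nat × Nat)
  | _, s, c, [] => [(s, c)]
  | prev, s, c, y :: ys =>
    if y = prev then pvRunsGo y s (c + 1) ys else (s, c) :: pvRunsGo y (s + c) 1 ys

-- maximal runs of equal consecutive values of a row, as (start, length)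
def pvRuns (l : List Int) : List (Nat × Nat) :=
  match l with
  | [] => []
  | x :: xs => pvRunsGo x 0 1 xs

def horsec_alt (mat : List (List Int)) : List (List Int) :=
  let n := mat.length
  (List.range (n - 1)).foldl (fun out i =>
    let row := (mat.getD i []).take n
    let long := (pvRuns row).filter (fun r => 2 ≤ r.2)
    match long with
    | [(s, L)] =>
        if L = 4 then out ++ [[(i : Int), (s : Int)], [(i : Int), (s : Int) + 3]]
        else if L = 5 then
          out ++ [[(i : Int), (s : Int)], [(i : Int), (s : Int) + 3],
                  [(i : Int), (s : Int) + 1], [(i : Int), (s : Int) + 4]]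
        else out
    | _ => out) []

-- ===== PRECONDITION & SPEC =====
-- A indexes mat[i][j+1] for all j < n-1 in each of the first n-1 rows (n = len(mat)),
-- so it raises IndexError unless each of those rows has at least n elements;
-- Pre_ is exactly the inputs where A returns.
def Pre_horsec (mat : List (List Int)) : Prop :=
  ∀ row ∈ mat.take (mat.length - 1), mat.length ≤ row.length
instance (mat : List (List Int)) : Decidable (Pre_horsec mat) := by unfold Pre_horsec; infer_instance

def pvWitness_horsec : List (List Int) :=
  [[1, 1, 1, 1, 2], [0, 1, 2, 3, 4], [5, 5, 5, 5, 5], [1, 2, 3, 4, 5], [9, 8, 7, 6, 5]]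

def Spec_horsec (mat : List (List Int)) (out : List (List Int)) : Prop := out = horsec_alt mat
instance (mat : List (List Int)) (out : List (List Int)) : Decidable (Spec_horsec mat out) := by unfold Spec_horsec; infer_instance

-- ===== CLAIM (what is proved, stated in full; the proofs are below) =====
def Claim_equal_horsec : Prop := ∀ (mat : List (List Int)), Dom_horsec mat → Pre_horsec mat → Spec_horsec mat (horsec mat)

-- ===== LEMMAS AND PROOFS =====

-- proof-side: length of the leading constant prefix, and a run-at-a-time
-- reformulation of B's scan with an explicit start offset
def pvCountLead (x : Int) : List Int → Nat
  | [] => 0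
  | y :: ys => if y = x then pvCountLead x ys + 1 else 0

def pvRunsR : List Int → Nat → List (Nat × Nat)
  | [], _ => []
  | x :: xs, s =>
    let k := pvCountLead x xs
    (s, k + 1) :: pvRunsR (xs.drop k) (s + k + 1)
  termination_by l _ => l.length
  decreasing_by simp [List.length_drop]

lemma pvCountLead_le (x : Int) (xs : List Int) : pvCountLead x xs ≤ xs.length := by
  induction xs generalizing x with
  | nil => simp [pvCountLead]
  | cons y ys ih =>
    simp only [pvCountLead, List.length_cons]
    split_ifs with h
    · subst h; exact Nat.succ_le_succ (ih y)
    · omega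

lemma pvRunsGo_spec : ∀ (xs : List Int) (prev : Int) (s c : Nat),
    pvRunsGo prev s c xs
      = (s, c + pvCountLead prev xs) :: pvRunsR (xs.drop (pvCountLead prev xs)) (s + c + pvCountLead prev xs) := by
  intro xs
  induction xs with
  | nil => intro prev s c; simp [pvRunsGo, pvCountLead, pvRunsR]
  | cons y ys ih =>
    intro prev s c
    by_cases h : y = prev
    · subst h
      simp [pvRunsGo, pvCountLead, ih y s (c+1)]
      refine ⟨by omega, ?_⟩
      congr 1
      omega

    · simp [pvRunsGo, pvCountLead, if_neg h, ih y (s+c) 1]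
      rw [pvRunsR]
      congr 2 <;> omega

lemma pvRuns_eq_R (l : List Int) : pvRuns l = pvRunsR l 0 := by
  cases l with
  | nil => rw [pvRunsR]; rfl
  | cons x xs =>
    show pvRunsGo x 0 1 xs = _
    rw [pvRunsGo_spec, pvRunsR]
    congr 2 <;> omega

-- A's sec at Nat level: the pair-indices j with l[j] = l[j+1]
def pvSecN (l : List Int) : List Nat :=
  (List.range (l.length - 1)).filter (fun j => decide (l.getD j 0 = l.getD (j + 1) 0))

lemma pvSecN_cons2 (a b : Int) (ys : List Int) :
    pvSecN (a :: b :: ys)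
      = (if a = b then 0 :: (pvSecN (b :: ys)).map (· + 1) else (pvSecN (b :: ys)).map (· + 1)) := by
  unfold pvSecN
  simp only [List.length_cons, Nat.add_sub_cancel, List.range_succ_eq_map]
  rw [List.filter_cons]
  simp only [List.getD_cons_zero, List.getD_cons_succ]
  rw [List.filter_map]
  simp only [Function.comp_def, List.getD_cons_succ]
  split_ifs with h1 h2 <;> simp_all

lemma pvSecN_run (x : Int) (xs : List Int) :
    pvSecN (x :: xs)
      = List.range (pvCountLead x xs)
        ++ (pvSecN (xs.drop (pvCountLead x xs))).map (· + (pvCountLead x xs + 1)) := by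
  induction xs generalizing x with
  | nil => simp [pvSecN, pvCountLead]
  | cons y ys ih =>
    by_cases h : y = x
    · subst h
      rw [pvSecN_cons2 y y ys, ih y]
      simp [pvCountLead, List.range_succ_eq_map, Function.comp_def,
            Nat.add_comm, Nat.add_left_comm]
    · rw [pvSecN_cons2 x y ys]
      simp [pvCountLead, if_neg h]
      exact fun e => h e.symm

lemma pvSecN_flat : ∀ (N : Nat) (l : List Int), l.length ≤ N → ∀ s : Nat,
    (pvSecN l).map (· + s) = (pvRunsR l s).flatMap (fun r => List.range' r.1 (r.2 - 1)) := by
  intro N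
  induction N with
  | zero =>
    intro l hl s
    have : l = [] := List.eq_nil_of_length_eq_zero (Nat.le_zero.mp hl)
    subst this; rw [pvRunsR]; simp [pvSecN]
  | succ n ih =>
    intro l hl s
    cases l with
    | nil => rw [pvRunsR]; simp [pvSecN]
    | cons x xs =>
      rw [pvRunsR, pvSecN_run x xs]
      simp only [List.flatMap_cons, Nat.add_sub_cancel]
      have hk := pvCountLead_le x xs
      have hdrop : (xs.drop (pvCountLead x xs)).length ≤ n := by
        simp [List.length_drop]; simp at hl; omega
      rw [List.map_append, List.map_map,
          show ((fun j => j + s) ∘ (fun j => j + (pvCountLead x xs + 1)))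
             = (fun j => j + (s + pvCountLead x xs + 1)) from by funext j; simp; omega,
          ih (xs.drop (pvCountLead x xs)) hdrop (s + pvCountLead x xs + 1)]
      congr 1
      · -- map (+s) (range k) = range' s k
        rw [List.range'_eq_map_range]
        simp [Nat.add_comm]

lemma pvRunsR_bounds : ∀ (N : Nat) (l : List Int), l.length ≤ N → ∀ s : Nat,
    ∀ r ∈ pvRunsR l s, s ≤ r.1 ∧ 1 ≤ r.2 := by
  intro N
  induction N with
  | zero =>
    intro l hl s
    have : l = [] := List.eq_nil_of_length_eq_zero (Nat.le_zero.mp hl)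
    subst this; rw [pvRunsR]; simp
  | succ n ih =>
    intro l hl s r hr
    cases l with
    | nil => rw [pvRunsR] at hr; simp at hr
    | cons x xs =>
      rw [pvRunsR] at hr
      simp only [List.mem_cons] at hr
      rcases hr with h | h
      · subst h; simp
      · have hdrop : (xs.drop (pvCountLead x xs)).length ≤ n := by
          simp [List.length_drop]; simp at hl; omega
        have := ih _ hdrop _ r h
        omega

lemma pvRunsR_pairwise : ∀ (N : Nat) (l : List Int), l.length ≤ N → ∀ s : Nat,
    (pvRunsR l s).Pairwise (fun a b => a.1 + a.2 ≤ b.1) := by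
  intro N
  induction N with
  | zero =>
    intro l hl s
    have : l = [] := List.eq_nil_of_length_eq_zero (Nat.le_zero.mp hl)
    subst this; rw [pvRunsR]; simp
  | succ n ih =>
    intro l hl s
    cases l with
    | nil => rw [pvRunsR]; simp
    | cons x xs =>
      rw [pvRunsR]
      have hdrop : (xs.drop (pvCountLead x xs)).length ≤ n := by
        simp [List.length_drop]; simp at hl; omega
      refine List.Pairwise.cons ?_ (ih _ hdrop _)
      intro r hr
      have := (pvRunsR_bounds n _ hdrop _ r hr).1
      simp; omega

lemma pvFlat_filter (R : List (Nat × Nat)) (h : ∀ r ∈ R, 1 ≤ r.2) :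
    R.flatMap (fun r => List.range' r.1 (r.2 - 1))
      = (R.filter (fun r => 2 ≤ r.2)).flatMap (fun r => List.range' r.1 (r.2 - 1)) := by
  induction R with
  | nil => simp
  | cons r rs ih =>
    have ih' := ih (fun a ha => h a (List.mem_cons_of_mem r ha))
    rw [List.filter_cons]
    by_cases h2 : 2 ≤ r.2
    · rw [if_pos (by simpa using h2)]
      simp only [List.flatMap_cons]
      rw [ih']
    · rw [if_neg (by simpa using h2)]
      have : r.2 - 1 = 0 := by have := h r (List.mem_cons_self ..); omega
      simp only [List.flatMap_cons, this, List.range'_zero, List.nil_append]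
      exact ih'

lemma pvSecN_eq_long (l : List Int) :
    pvSecN l = ((pvRuns l).filter (fun r => 2 ≤ r.2)).flatMap (fun r => List.range' r.1 (r.2 - 1)) := by
  have h := pvSecN_flat l.length l le_rfl 0
  simp only [Nat.add_zero] at h
  rw [pvRuns_eq_R, ← pvFlat_filter _ (fun r hr => (pvRunsR_bounds l.length l le_rfl 0 r hr).2), ← h]
  simp

lemma pvLong_pairwise (l : List Int) :
    ((pvRuns l).filter (fun r => 2 ≤ r.2)).Pairwise (fun a b => a.1 + a.2 ≤ b.1) := by
  rw [pvRuns_eq_R]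
  exact (pvRunsR_pairwise l.length l le_rfl 0).filter _

lemma pvLong_two (l : List Int) :
    ∀ r ∈ (pvRuns l).filter (fun r => 2 ≤ r.2), 2 ≤ r.2 := by
  intro r hr
  have := (List.mem_filter.mp hr).2
  simpa using this

lemma pyRange_cast (s m : Nat) :
    PySem.List.pyRange (s : Int) ((s : Int) + (m : Int)) = (List.range' s m).map (fun j : Nat => (j : Int)) := by
  induction m generalizing s with
  | zero =>
    simp only [Nat.cast_zero, add_zero, List.range'_zero, List.map_nil]
    rw [List.eq_nil_iff_forall_not_mem]
    intro x hx
    have := PySem.List.mem_pyRange_one.mp hx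
    omega
  | succ m ih =>
    rw [PySem.List.pyRange_one_cons (by omega), List.range'_succ, List.map_cons]
    congr 1
    have h1 : (s : Int) + 1 = ((s + 1 : Nat) : Int) := by push_cast; ring
    have h2 : (s : Int) + ((m + 1 : Nat) : Int) = ((s + 1 : Nat) : Int) + (m : Int) := by push_cast; ring
    rw [h1, h2, ih (s + 1)]

def pvEmit (i : Int) (l : List Int) : List (List Int) :=
  match (pvRuns l).filter (fun r => 2 ≤ r.2) with
  | [(s, L)] =>
      if L = 4 then [[i, (s : Int)], [i, (s : Int) + 3]]
      else if L = 5 then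
        [[i, (s : Int)], [i, (s : Int) + 3], [i, (s : Int) + 1], [i, (s : Int) + 4]]
      else []
  | _ => []

lemma rowA (l : List Int) (i : Int) (cs : List (List Int)) :
    (let sec := (pvSecN l).map (fun j : Nat => (j : Int))
     if sec ≠ [] ∧ sec = PySem.List.pyRange ((PySem.List.min? sec (fun y => y)).getD 0)
                                            (((PySem.List.max? sec (fun y => y)).getD 0) + 1) then
       let cs1 := if (sec.length : Int) = 3 then
           cs ++ [[i, (PySem.List.pyGet? sec 0).getD 0]] ++ [[i, (PySem.List.pyGet? sec 2).getD 0 + 1]]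
         else cs
       if (sec.length : Int) = 4 then
         cs1 ++ [[i, (PySem.List.pyGet? sec 0).getD 0]] ++ [[i, (PySem.List.pyGet? sec 2).getD 0 + 1]]
             ++ [[i, (PySem.List.pyGet? sec 0).getD 0 + 1]] ++ [[i, (PySem.List.pyGet? sec 3).getD 0 + 1]]
       else cs1
     else cs)
    = cs ++ pvEmit i l := by
  have hsec := pvSecN_eq_long l
  have hpw := pvLong_pairwise l
  have h2 := pvLong_two l
  unfold pvEmit
  cases hS : (pvRuns l).filter (fun r => 2 ≤ r.2) with
  | nil =>
    rw [hS] at hsec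
    simp [hsec]
  | cons r1 rest =>
    cases rest with
    | nil =>
      -- exactly one long run
      obtain ⟨s, L⟩ := r1
      rw [hS] at hsec
      have hL : 2 ≤ L := by have := h2 (s, L) (by rw [hS]; simp); simpa using this
      simp only [List.flatMap_cons, List.flatMap_nil, List.append_nil] at hsec
      by_cases h4 : L = 4
      · subst h4
        have hr : pvSecN l = [s, s + 1, s + 2] := by rw [hsec]; simp [List.range'_succ]
        have e1 : ((s + 1 : Nat) : Int) = (s : Int) + 1 := by push_cast; ring
        have e2 : ((s + 2 : Nat) : Int) = (s : Int) + 2 := by push_cast; ring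
        simp only [hr, List.map_cons, List.map_nil, e1, e2]
        rw [PySem.List.min?_id_cons, PySem.List.max?_id_cons]
        have hmin : List.foldl min ((s : Int)) [(s : Int) + 1, (s : Int) + 2] = (s : Int) := by
          simp only [List.foldl]; omega
        have hmax : List.foldl max ((s : Int)) [(s : Int) + 1, (s : Int) + 2] = (s : Int) + 2 := by
          simp only [List.foldl]; omega
        rw [hmin, hmax]
        simp only [Option.getD_some]
        rw [if_pos]
        · norm_num [PySem.List.pyGet?, PySem.List.pyIdx?, show Int.toNat 2 = 2 from rfl]
          ring
        · refine ⟨by simp, ?_⟩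
          have h3 := pyRange_cast s 3
          have : (s : Int) + 2 + 1 = (s : Int) + ((3 : Nat) : Int) := by push_cast; ring
          rw [this, h3]
          simp [List.range'_succ, e1, e2]
      · by_cases h5 : L = 5
        · subst h5
          have hr : pvSecN l = [s, s + 1, s + 2, s + 3] := by rw [hsec]; simp [List.range'_succ]
          have e1 : ((s + 1 : Nat) : Int) = (s : Int) + 1 := by push_cast; ring
          have e2 : ((s + 2 : Nat) : Int) = (s : Int) + 2 := by push_cast; ring
          have e3 : ((s + 3 : Nat) : Int) = (s : Int) + 3 := by push_cast; ring
          simp only [hr, List.map_cons, List.map_nil, e1, e2, e3]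
          rw [PySem.List.min?_id_cons, PySem.List.max?_id_cons]
          have hmin : List.foldl min ((s : Int)) [(s : Int) + 1, (s : Int) + 2, (s : Int) + 3] = (s : Int) := by
            simp only [List.foldl]; omega
          have hmax : List.foldl max ((s : Int)) [(s : Int) + 1, (s : Int) + 2, (s : Int) + 3] = (s : Int) + 3 := by
            simp only [List.foldl]; omega
          rw [hmin, hmax]
          simp only [Option.getD_some]
          rw [if_pos]
          · norm_num [PySem.List.pyGet?, PySem.List.pyIdx?, show Int.toNat 2 = 2 from rfl,
                      show Int.toNat 3 = 3 from rfl]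
            constructor <;> ring
          · refine ⟨by simp, ?_⟩
            have h3 := pyRange_cast s 4
            have : (s : Int) + 3 + 1 = (s : Int) + ((4 : Nat) : Int) := by push_cast; ring
            rw [this, h3]
            simp [List.range'_succ, e1, e2, e3]
        · -- L ∉ {4,5}: both length tests fail, so A adds nothing whichever way the guard goes
          have hlen : (pvSecN l).length = L - 1 := by rw [hsec]; simp
          have hne3 : ¬ ((((pvSecN l).map (fun j : Nat => (j : Int))).length : Int) = 3) := by
            simp [hlen]; omega
          have hne4 : ¬ ((((pvSecN l).map (fun j : Nat => (j : Int))).length : Int) = 4) := by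
            simp [hlen]; omega
          simp only [if_neg hne3, if_neg hne4, ite_self]
          simp [if_neg h4, if_neg h5]
    | cons r2 rest' =>
      -- at least two long runs: A's consecutiveness guard is false
      obtain ⟨s1, L1⟩ := r1
      obtain ⟨s2, L2⟩ := r2
      rw [hS] at hsec
      have hL1 : 2 ≤ L1 := by have := h2 (s1, L1) (by rw [hS]; simp); simpa using this
      have hL2 : 2 ≤ L2 := by have := h2 (s2, L2) (by rw [hS]; simp); simpa using this
      rw [hS] at hpw
      have hpc := List.pairwise_cons.mp hpw
      have hgap : s1 + L1 ≤ s2 := by have := hpc.1 (s2, L2) (by simp); simpa using this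
      have hrest : ∀ r ∈ rest', s1 + L1 ≤ r.1 := fun r hr =>
        by have := hpc.1 r (by simp [hr]); simpa using this
      have hg_not : (s1 + L1 - 1) ∉ pvSecN l := by
        rw [hsec]
        intro hmem
        simp only [List.flatMap_cons, List.mem_append, List.mem_flatMap, List.mem_range'_1] at hmem
        rcases hmem with h | h | h
        · omega
        · omega
        · rcases h with ⟨r, hr, hr2⟩
          have := hrest r hr
          omega
      have hs1_mem : s1 ∈ pvSecN l := by
        rw [hsec]
        simp only [List.flatMap_cons, List.mem_append, List.mem_range'_1]
        left; omega
      have hs2_mem : s2 ∈ pvSecN l := by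
        rw [hsec]
        simp only [List.flatMap_cons, List.mem_append, List.mem_range'_1]
        right; left; omega
      rw [if_neg]
      · simp
      · rintro ⟨hne, heq⟩
        cases hmin : PySem.List.min? ((pvSecN l).map (fun j : Nat => (j : Int))) (fun y => y) with
        | none => exact hne ((PySem.List.min?_eq_none_iff _ _).mp hmin)
        | some m =>
          cases hmax : PySem.List.max? ((pvSecN l).map (fun j : Nat => (j : Int))) (fun y => y) with
          | none => exact hne ((PySem.List.max?_eq_none_iff _ _).mp hmax)
          | some M =>
            rw [hmin, hmax] at heq
            simp only [Option.getD_some] at heq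
            have hm_le : m ≤ (s1 : Int) :=
              PySem.List.min?_id_le hmin _ (List.mem_map_of_mem hs1_mem)
            have hM_ge : (s2 : Int) ≤ M :=
              PySem.List.max?_id_le hmax _ (List.mem_map_of_mem hs2_mem)
            have hg_in : ((s1 + L1 - 1 : Nat) : Int) ∈ (pvSecN l).map (fun j : Nat => (j : Int)) := by
              rw [heq]
              exact PySem.List.mem_pyRange_one.mpr ⟨by omega, by omega⟩
            rcases List.mem_map.mp hg_in with ⟨x, hx, he⟩
            have : x = s1 + L1 - 1 := by exact_mod_cast he
            exact hg_not (this ▸ hx)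

lemma pyRange_nil (a b : Int) (h : b ≤ a) : PySem.List.pyRange a b = [] := by
  rw [List.eq_nil_iff_forall_not_mem]
  intro x hx
  have := PySem.List.mem_pyRange_one.mp hx
  omega

lemma A_secfold (row : List Int) (m : Nat) (h : m + 1 ≤ row.length) :
    ((List.range m).map (fun k : Nat => (k : Int))).foldl (fun sec j =>
        if (PySem.List.pyGet? row j).getD 0 = (PySem.List.pyGet? row (j + 1)).getD 0
        then sec ++ [j] else sec) []
      = (pvSecN (row.take (m + 1))).map (fun j : Nat => (j : Int)) := by
  rw [List.foldl_map]
  have hfun : (fun (sec : List Int) (k : Nat) =>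
      if (PySem.List.pyGet? row (k : Int)).getD 0 = (PySem.List.pyGet? row ((k : Int) + 1)).getD 0
      then sec ++ [(k : Int)] else sec)
      = (fun (sec : List Int) (k : Nat) =>
      if (fun k : Nat => decide ((PySem.List.pyGet? row (k : Int)).getD 0 = (PySem.List.pyGet? row ((k : Int) + 1)).getD 0)) k = true
      then sec ++ [(fun k : Nat => (k : Int)) k] else sec) := by
    funext sec k
    simp
  rw [hfun, PySem.List.foldl_append_if]
  rw [List.nil_append]
  unfold pvSecN
  have hlen : (row.take (m + 1)).length = m + 1 := by
    rw [List.length_take]; omega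
  rw [hlen, Nat.add_sub_cancel]
  have hfilter : ∀ k ∈ List.range m,
      (decide ((PySem.List.pyGet? row (k : Int)).getD 0 = (PySem.List.pyGet? row ((k : Int) + 1)).getD 0))
      = (decide ((row.take (m + 1)).getD k 0 = (row.take (m + 1)).getD (k + 1) 0)) := by
    intro k hk
    have hk' : k < m := List.mem_range.mp hk
    have g1 : (PySem.List.pyGet? row (k : Int)).getD 0 = (row.take (m + 1)).getD k 0 := by
      rw [PySem.List.pyGet?_natCast, List.getD_eq_getElem?_getD, List.getElem?_take,
          if_pos (by omega)]
    have g2 : (PySem.List.pyGet? row ((k : Int) + 1)).getD 0 = (row.take (m + 1)).getD (k + 1) 0 := by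
      rw [show ((k : Int) + 1) = ((k + 1 : Nat) : Int) from by push_cast; ring,
          PySem.List.pyGet?_natCast, List.getD_eq_getElem?_getD, List.getElem?_take,
          if_pos (by omega)]
    rw [g1, g2]
  rw [List.filter_congr hfilter]

lemma B_step (out : List (List Int)) (i : Nat) (l : List Int) :
    (match (pvRuns l).filter (fun r => 2 ≤ r.2) with
     | [(s, L)] =>
        if L = 4 then out ++ [[(i : Int), (s : Int)], [(i : Int), (s : Int) + 3]]
        else if L = 5 then
          out ++ [[(i : Int), (s : Int)], [(i : Int), (s : Int) + 3],
                  [(i : Int), (s : Int) + 1], [(i : Int), (s : Int) + 4]]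
        else out
     | _ => out)
    = out ++ pvEmit (i : Int) l := by
  unfold pvEmit
  cases hS : (pvRuns l).filter (fun r => 2 ≤ r.2) with
  | nil => simp
  | cons r1 rest =>
    cases rest with
    | nil =>
      obtain ⟨s, L⟩ := r1
      by_cases h4 : L = 4 <;> by_cases h5 : L = 5 <;> simp [h4, h5]
    | cons r2 rest' =>
      obtain ⟨s1, L1⟩ := r1
      obtain ⟨s2, L2⟩ := r2
      simp

lemma horsec_eq (mat : List (List Int)) (hpre : Pre_horsec mat) :
    horsec mat = horsec_alt mat := by
  unfold horsec horsec_alt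
  simp only []
  cases hn : mat.length with
  | zero =>
    rw [pyRange_nil 0 ((0 : Nat) - 1) (by norm_num)]
    simp
  | succ m =>
    rw [show ((m + 1 : Nat) : Int) - 1 = (m : Nat) from by push_cast; ring,
        PySem.List.pyRange_zero_natCast, List.foldl_map, Nat.add_sub_cancel]
    apply PySem.List.foldl_congr_mem
    intro cs i hi
    have hi' : i < m := List.mem_range.mp hi
    have hrow : (PySem.List.pyGet? mat (i : Int)).getD [] = mat.getD i [] := by
      rw [PySem.List.pyGet?_natCast, List.getD_eq_getElem?_getD]
    have h1 : (mat.take m)[i]? = some (mat.getD i []) := by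
      rw [List.getElem?_take, if_pos hi', List.getD_eq_getElem?_getD,
          List.getElem?_eq_getElem (by omega)]
      simp
    have hmem : mat.getD i [] ∈ mat.take (mat.length - 1) := by
      rw [hn, Nat.add_sub_cancel]
      exact List.mem_of_getElem? h1
    have hlen : m + 1 ≤ (mat.getD i []).length := by
      have := hpre _ hmem
      omega
    simp only [hrow]
    rw [A_secfold (mat.getD i []) m hlen, B_step, rowA]

-- ===== VERDICT (by name: the statement is the Claim_ definition above) =====
theorem horsec_spec : Claim_equal_horsec := by
  intro mat _ hpre
  unfold Spec_horsec
  exact horsec_eq mat hpre
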